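-- pv_equiv track=rewrite | github.com/redfast00/euler | 79/cracker.py | is_good_guess
-- ===== SOURCE A (Python) =====
-- def index_or_else(list_, value, default):
--     try:
--         return list_.index(value)
--     except ValueError:
--         return default
--
-- def is_good_guess(guess, codes):
--     for code in codes:
--         minimum = 0
--         for character in guess:
--             idx = index_or_else(code, character, None)
--             if idx is not None:
--                 if minimum < idx:
--                     return False
--                 minimum += 1
--     return True
-- ===== SOURCE B (Python) =====
-- def is_good_guess(guess, codes):
--     # Reformulation: the m-th guess character that occurs in code must have its
--     # first occurrence within code[:m+1], i.e. be a member of the (m+1)-prefix.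
--     # So zip the matched guess chars against code, growing a prefix set, and
--     # test membership -- no first-occurrence indices or counters at all.
--     for code in codes:
--         present = set(code)
--         matched = [c for c in guess if c in present]
--         seen = set()
--         for prefix_char, c in zip(code, matched):
--             seen.add(prefix_char)
--             if c not in seen:
--                 return False
--     return True
-- ===== Notes on version B (the rewrite author's own statement) =====
-- stated objective: alternative
-- what changed: B never computes first-occurrence indices or a counter: it zips the matched guess characters against the code itself, growing a prefix set one code character per step, and rejects when the m-th matched character is not in the (m+1)-character prefix of the code, removing A's per-character list.index rescans.
import Mathlib
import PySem

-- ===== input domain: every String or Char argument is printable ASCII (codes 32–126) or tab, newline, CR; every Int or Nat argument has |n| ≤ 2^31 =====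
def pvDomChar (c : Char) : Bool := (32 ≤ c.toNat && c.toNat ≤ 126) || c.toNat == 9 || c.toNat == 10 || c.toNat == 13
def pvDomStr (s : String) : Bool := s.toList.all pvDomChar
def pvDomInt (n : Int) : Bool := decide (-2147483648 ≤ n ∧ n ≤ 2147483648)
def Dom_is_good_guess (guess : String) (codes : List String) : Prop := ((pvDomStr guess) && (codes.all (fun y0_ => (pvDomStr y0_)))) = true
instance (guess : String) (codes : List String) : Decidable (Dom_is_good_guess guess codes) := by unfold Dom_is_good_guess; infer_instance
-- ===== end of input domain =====

-- B re-checks the ordering by membership of the m-th matched guess character in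
-- the (m+1)-prefix of the code (grown as a set while zipping), instead of A's
-- list.index rescans compared against a running counter.


-- ===== PORT A =====
-- index_or_else(code, character, None): str.index of a single char = first
-- occurrence; ValueError -> None, exactly PySem.List.index? (mapped to Int).
def indexOrElse (l : List Char) (v : Char) : Option Int :=
  (PySem.List.index? l v).map Int.ofNat

-- the inner 'for character in guess' loop with its running 'minimum' counter
def iggLoop (code : List Char) (minimum : Int) : List Char → Bool
  | [] => true
  | c :: rest =>
    match indexOrElse code c with
    | some idx => if minimum < idx then false else iggLoop code (minimum + 1) rest
    | none => iggLoop code minimum rest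

def is_good_guess (guess : String) (codes : List String) : Bool :=
  codes.all (fun code => iggLoop code.toList 0 guess.toList)

-- ===== PORT B =====
-- 'for prefix_char, c in zip(code, matched): seen.add(prefix_char); if c not in seen: return False'
def prefixCheck : List Char → List Char → PySem.Set Char → Bool
  | p :: ps, c :: cs, seen =>
    let seen' := PySem.Set.add seen p
    if PySem.Set.contains seen' c then prefixCheck ps cs seen' else false
  | _, _, _ => true

def is_good_guess_alt (guess : String) (codes : List String) : Bool :=
  codes.all (fun code =>
    let present := PySem.Set.ofList code.toList
    let matched := guess.toList.filter (fun c => PySem.Set.contains present c)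
    prefixCheck code.toList matched PySem.Set.empty)

-- ===== PRECONDITION & SPEC =====
def Spec_is_good_guess (guess : String) (codes : List String) (out : Bool) : Prop := out = is_good_guess_alt guess codes
instance (guess : String) (codes : List String) (out : Bool) : Decidable (Spec_is_good_guess guess codes out) := by unfold Spec_is_good_guess; infer_instance

-- ===== CLAIM (what is proved, stated in full; the proofs are below) =====
def Claim_equal_is_good_guess : Prop := ∀ (guess : String) (codes : List String), Dom_is_good_guess guess codes → Spec_is_good_guess guess codes (is_good_guess guess codes)

-- ===== LEMMAS AND PROOFS =====

-- abstract form of A's inner loop over the materialized first-index list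
def checkFrom (m : Int) : List Int → Bool
  | [] => true
  | i :: rest => if m < i then false else checkFrom (m + 1) rest

theorem iggLoop_eq_checkFrom (code : List Char) :
    ∀ (gs : List Char) (m : Int),
      iggLoop code m gs =
        checkFrom m (gs.filterMap (fun c => (PySem.List.index? code c).map Int.ofNat))
  | [], m => rfl
  | c :: rest, m => by
      simp only [iggLoop, indexOrElse, List.filterMap_cons]
      cases h : (PySem.List.index? code c).map Int.ofNat with
      | none => exact iggLoop_eq_checkFrom code rest m
      | some idx =>
        simp only [checkFrom]
        split
        · rfl
        · exact iggLoop_eq_checkFrom code rest (m + 1)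

theorem prefixCheck_nil_right (xs : List Char) (seen : PySem.Set Char) :
    prefixCheck xs [] seen = true := by
  cases xs <;> rfl

theorem prefixCheck_nil_left (cs : List Char) (seen : PySem.Set Char) :
    prefixCheck [] cs seen = true := by
  cases cs <;> rfl

theorem setContains_eq_decide (s : PySem.Set Char) (d : Char) :
    PySem.Set.contains s d = decide (d ∈ s) := by
  apply Bool.eq_iff_iff.mpr
  simp

-- membership in a prefix of code = first occurrence index below the cut
theorem mem_take_iff_index?_lt :
    ∀ (code : List Char) (c : Char) (i k : Nat),
      PySem.List.index? code c = some i → (c ∈ code.take k ↔ i < k)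
  | [], c, i, k => by rw [PySem.List.index?_eq_idxOf?]; simp
  | x :: rest, c, i, k => by
      intro h
      by_cases hxc : x = c
      · subst hxc
        rw [PySem.List.index?_cons_self] at h
        cases h
        cases k
        · simp
        · simp [List.take_succ_cons]
      · rw [PySem.List.index?_cons_of_ne rest hxc] at h
        cases hj : PySem.List.index? rest c with
        | none => rw [hj] at h; simp at h
        | some j =>
          rw [hj] at h
          simp only [Option.map_some, Option.some.injEq] at h
          subst h
          cases k with
          | zero => simp
          | succ k' =>
            rw [List.take_succ_cons]
            simp only [List.mem_cons]
            rw [mem_take_iff_index?_lt rest c j k' hj]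
            constructor
            · rintro (h | h)
              · exact absurd h.symm hxc
              · omega
            · intro h
              right
              omega

theorem checkFrom_of_all_le :
    ∀ (L : List Int) (m : Int), (∀ i ∈ L, i ≤ m) → checkFrom m L = true
  | [], _, _ => rfl
  | i :: rest, m, h => by
      simp only [checkFrom]
      have hi : ¬ m < i := by have := h i (by simp); omega
      simp only [hi, if_false]
      exact checkFrom_of_all_le rest (m + 1)
        (fun j hj => by have := h j (by simp [hj]); omega)

-- index? of a member is some index below the length
theorem index?_lt_length (code : List Char) (c : Char) (i : Nat)
    (h : PySem.List.index? code c = some i) : i < code.length := by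
  obtain ⟨hk, _, _⟩ := PySem.List.getElem_of_index?_eq_some h
  exact hk

-- MAIN: B's zip-and-membership pass equals A's index-vs-counter check
theorem prefixCheck_eq_checkFrom (code : List Char) :
    ∀ (gs : List Char) (m : Nat) (seen : PySem.Set Char),
      (∀ c, PySem.Set.contains seen c = decide (c ∈ code.take m)) →
      prefixCheck (code.drop m) (gs.filter (fun c => decide (c ∈ code))) seen =
        checkFrom (Int.ofNat m)
          (gs.filterMap (fun c => (PySem.List.index? code c).map Int.ofNat))
  | [], m, seen, _ => by
      simp only [List.filter_nil, List.filterMap_nil]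
      exact prefixCheck_nil_right _ _
  | c :: gs, m, seen, hseen => by
      simp only [List.filter_cons, List.filterMap_cons]
      by_cases hc : c ∈ code
      · obtain ⟨i, hi⟩ := Option.isSome_iff_exists.mp
          ((PySem.List.index?_isSome_iff (xs := code) (v := c)).2 hc)
        have hilen : i < code.length := index?_lt_length code c i hi
        simp only [hc, decide_true, if_true, hi, Option.map_some]
        by_cases hmlen : m < code.length
        · rw [List.drop_eq_getElem_cons hmlen]
          simp only [prefixCheck]
          have hseen' : ∀ d, PySem.Set.contains (PySem.Set.add seen code[m]) d
              = decide (d ∈ code.take (m + 1)) := by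
            intro d
            have hs : d ∈ seen ↔ d ∈ code.take m := by
              have := hseen d
              rw [setContains_eq_decide] at this
              exact decide_eq_decide.mp this
            rw [setContains_eq_decide]
            apply decide_eq_decide.mpr
            rw [PySem.Set.mem_add, List.take_add_one,
              List.getElem?_eq_getElem hmlen]
            simp only [List.mem_append, List.mem_singleton, Option.toList_some, hs]
          rw [hseen' c]
          have hmem : (c ∈ code.take (m + 1)) ↔ i < m + 1 :=
            mem_take_iff_index?_lt code c i (m + 1) hi
          simp only [checkFrom]
          by_cases hlt : i < m + 1
          · rw [decide_eq_true (hmem.mpr hlt), if_pos rfl,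
              if_neg (by simp only [Int.ofNat_eq_natCast]; omega :
                ¬ (Int.ofNat m < Int.ofNat i))]
            rw [show (Int.ofNat m + 1) = Int.ofNat (m + 1) from rfl]
            exact prefixCheck_eq_checkFrom code gs (m + 1)
              (PySem.Set.add seen code[m]) hseen'
          · rw [decide_eq_false (fun h => hlt (hmem.mp h))]
            simp only [Bool.false_eq_true, if_false]
            rw [if_pos (by simp only [Int.ofNat_eq_natCast]; omega :
              Int.ofNat m < Int.ofNat i)]
        · -- m beyond the code: zip is empty and every remaining index ≤ m
          rw [List.drop_eq_nil_of_le (by omega : code.length ≤ m), prefixCheck_nil_left]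
          symm
          apply checkFrom_of_all_le
          intro j hj
          simp only [List.mem_cons] at hj
          rcases hj with hj | hj
          · subst hj; simp only [Int.ofNat_eq_natCast]; omega
          · obtain ⟨d, _, hdj⟩ := List.mem_filterMap.mp hj
            cases hidx : PySem.List.index? code d with
            | none => rw [hidx] at hdj; simp at hdj
            | some jd =>
              rw [hidx] at hdj
              simp only [Option.map_some, Option.some.injEq] at hdj
              have := index?_lt_length code d jd hidx
              subst hdj
              simp only [Int.ofNat_eq_natCast]
              omega
      · have hnone : PySem.List.index? code c = none := by
          rw [PySem.List.index?_eq_idxOf?]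
          exact List.idxOf?_eq_none_iff.mpr hc
        simp only [hc, decide_false, Bool.false_eq_true, if_false, hnone,
          Option.map_none]
        exact prefixCheck_eq_checkFrom code gs m seen hseen

-- ===== VERDICT (by name: the statement is the Claim_ definition above) =====
theorem is_good_guess_spec : Claim_equal_is_good_guess := by
  intro guess codes _
  unfold Spec_is_good_guess is_good_guess is_good_guess_alt
  refine congrArg codes.all (funext fun code => ?_)
  dsimp only
  rw [iggLoop_eq_checkFrom]
  have hfil : List.filter (fun c => (PySem.Set.ofList code.toList).contains c) guess.toList
      = List.filter (fun c => decide (c ∈ code.toList)) guess.toList := by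
    apply List.filter_congr
    intro c _
    rw [setContains_eq_decide]
    exact decide_eq_decide.mpr (PySem.Set.mem_ofList _ _)
  rw [hfil]
  exact (prefixCheck_eq_checkFrom code.toList guess.toList 0 PySem.Set.empty
    (by intro c; simp [PySem.Set.empty])).symm
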